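-- pv_equiv track=rewrite | github.com/early-yoga-class/algorithm-study | programmers/서버증설횟수/ch.py | solution
-- ===== SOURCE A (Python) =====
-- from collections import deque
--
-- def solution(players, m, k):
--     answer = 0
--
--     scale_in = deque()
--
--     for hour, player in enumerate(players):
--         while scale_in and scale_in[0] <= hour:
--             scale_in.popleft()
--
--         need_cnt = player // m
--         if need_cnt > len(scale_in):
--             for i in range(need_cnt - len(scale_in)):
--                 scale_in.append(hour + k)
--                 answer += 1
--
--     return answer
-- ===== SOURCE B (Python) =====
-- def solution(players, m, k):
--     # Track the number of currently running servers with a sliding-window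
--     # count over per-hour additions instead of simulating each server in a deque.
--     answer = 0
--     active = 0          # servers that are running during the current hour
--     adds = []           # adds[h] = servers added at hour h
--     for hour, player in enumerate(players):
--         need = player // m
--         add = need - active if need > active else 0
--         adds.append(add)
--         answer += add
--         if k >= 2:
--             # a server added now runs through hours hour..hour+k-1;
--             # entering the next hour's window: this hour's additions,
--             # leaving it: the additions of hour hour-k+1 (their last hour is now)
--             active += add
--             if hour - k + 1 >= 0:
--                 active -= adds[hour - k + 1]
--     return answer
-- ===== Notes on version B (the rewrite author's own statement) =====
-- stated objective: alternative
-- what changed: Replaces the per-server deque simulation (one append/pop per individual server) with a sliding-window count of active servers: per hour the deficit is computed arithmetically from a counter updated by the additions entering/leaving the k-hour window.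
import Mathlib
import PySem

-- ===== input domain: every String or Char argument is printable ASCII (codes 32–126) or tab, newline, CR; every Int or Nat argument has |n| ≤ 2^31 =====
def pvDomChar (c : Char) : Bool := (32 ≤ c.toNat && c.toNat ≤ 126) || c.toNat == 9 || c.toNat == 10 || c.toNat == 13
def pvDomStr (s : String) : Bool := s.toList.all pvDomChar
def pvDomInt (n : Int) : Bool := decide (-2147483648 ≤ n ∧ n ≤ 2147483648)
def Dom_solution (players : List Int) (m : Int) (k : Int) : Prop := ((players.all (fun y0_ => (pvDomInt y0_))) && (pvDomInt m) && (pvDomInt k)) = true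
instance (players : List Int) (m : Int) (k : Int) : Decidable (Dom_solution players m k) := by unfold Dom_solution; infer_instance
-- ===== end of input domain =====

-- B replaces A's per-server deque simulation with a sliding-window counter of
-- active servers (an alternative algorithm); only the RETURN value is claimed equal.

-- ===== PORT A =====
-- the 'while scale_in and scale_in[0] <= hour: scale_in.popleft()' loop
def popExpired (q : List Int) (hour : Int) : List Int :=
  match q with
  | [] => []
  | x :: rest => if x ≤ hour then popExpired rest hour else x :: rest

-- one iteration of A's 'for hour, player in enumerate(players)' loop; state = (answer, scale_in)
def stepA (m k : Int) (st : Int × List Int) (hp : Int × Int) : Int × List Int :=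
  let q := popExpired st.2 hp.1
  let need_cnt := PySem.Int.floordiv hp.2 m
  if need_cnt > (q.length : Int) then
    -- 'for i in range(need_cnt - len(scale_in)): scale_in.append(hour + k); answer += 1'
    (PySem.List.pyRange 0 (need_cnt - (q.length : Int)) 1).foldl
      (fun s _ => (s.1 + 1, s.2 ++ [hp.1 + k])) (st.1, q)
  else (st.1, q)

def solution (players : List Int) (m : Int) (k : Int) : Int :=
  ((PySem.List.enumerate players 0).foldl (stepA m k) (0, [])).1

-- ===== PORT B =====
-- one iteration of B's loop; state = (answer, active, adds)
-- (the pyGetD index 'hour - k + 1' is provably in range whenever it is read, so the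
-- default 0 is never used — exact transliteration of Python's adds[hour - k + 1])
def stepB (m k : Int) (st : Int × Int × List Int) (hp : Int × Int) : Int × Int × List Int :=
  let need := PySem.Int.floordiv hp.2 m
  let add := if need > st.2.1 then need - st.2.1 else 0
  let adds' := st.2.2 ++ [add]
  let ans' := st.1 + add
  if 2 ≤ k then
    let act1 := st.2.1 + add
    if 0 ≤ hp.1 - k + 1 then (ans', act1 - PySem.List.pyGetD adds' (hp.1 - k + 1) 0, adds')
    else (ans', act1, adds')
  else (ans', st.2.1, adds')

def solution_alt (players : List Int) (m : Int) (k : Int) : Int :=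
  ((PySem.List.enumerate players 0).foldl (stepB m k) (0, 0, [])).1

-- ===== PRECONDITION & SPEC =====
-- A raises ZeroDivisionError when m = 0 (player // m), as does B, unless players = []
def Pre_solution (players : List Int) (m : Int) (k : Int) : Prop := m ≠ 0 ∨ players = []
instance (players : List Int) (m : Int) (k : Int) : Decidable (Pre_solution players m k) := by
  unfold Pre_solution; infer_instance
def pvWitness_solution : List Int × Int × Int := ([5, 1, 4], 2, 2)

def Spec_solution (players : List Int) (m : Int) (k : Int) (out : Int) : Prop := out = solution_alt players m k
instance (players : List Int) (m : Int) (k : Int) (out : Int) : Decidable (Spec_solution players m k out) := by unfold Spec_solution; infer_instance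

-- ===== CLAIM (what is proved, stated in full; the proofs are below) =====
def Claim_equal_solution : Prop := ∀ (players : List Int) (m : Int) (k : Int), Dom_solution players m k → Pre_solution players m k → Spec_solution players m k (solution players m k)

-- ===== LEMMAS AND PROOFS =====

-- the multiset of expiry times still alive at threshold t: index j (of adds) contributes
-- adds[j] copies of j+k when j+k > t; j is the index of the head
def wl (adds : List Int) (k t j : Int) : List Int :=
  match adds with
  | [] => []
  | a :: rest => (if j + k > t then List.replicate a.toNat (j + k) else []) ++ wl rest k t (j + 1)

def winSum (adds : List Int) (k t j : Int) : Int :=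
  match adds with
  | [] => 0
  | a :: rest => (if j + k > t then a else 0) + winSum rest k t (j + 1)

theorem wl_length (adds : List Int) (k t j : Int) (h : ∀ a ∈ adds, 0 ≤ a) :
    ((wl adds k t j).length : Int) = winSum adds k t j := by
  induction adds generalizing j with
  | nil => simp [wl, winSum]
  | cons a rest ih =>
    have ha : 0 ≤ a := h a (by simp)
    simp only [wl, winSum, List.length_append]
    rw [Int.natCast_add, ih (j + 1) (fun x hx => h x (by simp [hx]))]
    split <;> simp <;> omega

theorem wl_mem_lb (adds : List Int) (k t j : Int) (e : Int) (he : e ∈ wl adds k t j) :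
    j + k ≤ e ∧ t < e := by
  induction adds generalizing j with
  | nil => simp [wl] at he
  | cons a rest ih =>
    simp only [wl, List.mem_append] at he
    rcases he with he | he
    · by_cases hc : j + k > t
      · rw [if_pos hc] at he
        have := List.eq_of_mem_replicate he
        omega
      · rw [if_neg hc] at he; simp at he
    · have := ih (j + 1) he; omega

theorem wl_pairwise (adds : List Int) (k t j : Int) :
    (wl adds k t j).Pairwise (· ≤ ·) := by
  induction adds generalizing j with
  | nil => simp [wl]
  | cons a rest ih =>
    simp only [wl]
    refine List.pairwise_append.mpr ⟨?_, ih (j + 1), ?_⟩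
    · split
      · exact List.pairwise_replicate.mpr (by simp)
      · simp
    · intro x hx y hy
      have hx' : x = j + k := by
        split at hx
        · exact List.eq_of_mem_replicate hx
        · simp at hx
      have := wl_mem_lb rest k t (j + 1) y hy
      omega

theorem wl_mem_ub (adds : List Int) (k t j : Int) (e : Int) (he : e ∈ wl adds k t j) :
    e ≤ j + (adds.length : Int) - 1 + k := by
  induction adds generalizing j with
  | nil => simp [wl] at he
  | cons a rest ih =>
    simp only [wl, List.mem_append] at he
    rcases he with he | he
    · have : e = j + k := by
        split at he
        · exact List.eq_of_mem_replicate he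
        · simp at he
      simp; omega
    · have := ih (j + 1) he; simp; omega

theorem wl_filter (adds : List Int) (k h t j : Int) (hht : h ≤ t) :
    (wl adds k h j).filter (fun e => decide (t < e)) = wl adds k t j := by
  induction adds generalizing j with
  | nil => simp [wl]
  | cons a rest ih =>
    simp only [wl, List.filter_append, ih (j + 1)]
    congr 1
    by_cases h1 : j + k > t
    · have h2 : j + k > h := by omega
      simp [h1, h2]
    · by_cases h2 : j + k > h <;> simp [h1, h2]

theorem wl_append (adds : List Int) (a k t j : Int) :
    wl (adds ++ [a]) k t j =
      wl adds k t j ++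
        (if j + (adds.length : Int) + k > t then List.replicate a.toNat (j + (adds.length : Int) + k) else []) := by
  induction adds generalizing j with
  | nil => simp [wl]
  | cons b rest ih =>
    simp only [List.cons_append, wl, ih (j + 1), List.length_cons, List.append_assoc]
    congr 1
    congr 1
    split_ifs with hc1 hc2 hc2
    · have : j + 1 + (rest.length : Int) + k = j + ((rest.length + 1 : Nat) : Int) + k := by push_cast; ring
      rw [this]
    · exact absurd hc1 (by push_cast at hc2 ⊢; omega)
    · exact absurd hc2 (by push_cast at hc1 ⊢; omega)
    · rfl

theorem winSum_append (adds : List Int) (a k t j : Int) :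
    winSum (adds ++ [a]) k t j =
      winSum adds k t j + (if j + (adds.length : Int) + k > t then a else 0) := by
  induction adds generalizing j with
  | nil => simp [winSum]
  | cons b rest ih =>
    simp only [List.cons_append, winSum, ih (j + 1), List.length_cons]
    split_ifs <;> push_cast at * <;> omega

theorem pyGetD_cons_shift (a : Int) (rest : List Int) (i : Int)
    (h0 : 0 < i) (h1 : i < (rest.length : Int) + 1) :
    PySem.List.pyGetD (a :: rest) i 0 = PySem.List.pyGetD rest (i - 1) 0 := by
  obtain ⟨n, rfl⟩ : ∃ n : Nat, i = (n : Int) := ⟨i.toNat, by omega⟩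
  obtain ⟨p, rfl⟩ : ∃ p : Nat, n = p + 1 := ⟨n - 1, by omega⟩
  have h2 : ((p + 1 : Nat) : Int) - 1 = ((p : Nat) : Int) := by push_cast; ring
  rw [h2, PySem.List.pyGetD_natCast, PySem.List.pyGetD_natCast]
  simp [List.getD]

theorem winSum_succ (adds : List Int) (k t j : Int) :
    winSum adds k (t + 1) j =
      winSum adds k t j -
        (if j ≤ t + 1 - k ∧ t + 1 - k < j + (adds.length : Int)
         then PySem.List.pyGetD adds (t + 1 - k - j) 0 else 0) := by
  induction adds generalizing j with
  | nil => simp [winSum]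
  | cons a rest ih =>
    simp only [winSum, ih (j + 1), List.length_cons]
    by_cases hj0 : 0 < t + 1 - k - j ∧ t + 1 - k - j < (rest.length : Int) + 1
    · have hsh := pyGetD_cons_shift a rest (t + 1 - k - j) hj0.1 hj0.2
      have hidx : t + 1 - k - (j + 1) = t + 1 - k - j - 1 := by ring
      rw [hidx]
      split_ifs <;> push_cast at * <;> omega
    · by_cases hj1 : t + 1 - k = j
      · have h0 : PySem.List.pyGetD (a :: rest) (t + 1 - k - j) 0 = a := by
          rw [show t + 1 - k - j = 0 from by omega]
          simp [PySem.List.pyGetD_zero_cons]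
        split_ifs <;> push_cast at * <;> omega
      · split_ifs <;> push_cast at * <;> omega

theorem popExpired_sorted (q : List Int) (t : Int) (h : q.Pairwise (· ≤ ·)) :
    popExpired q t = q.filter (fun e => decide (t < e)) := by
  induction q with
  | nil => simp [popExpired]
  | cons x rest ih =>
    rcases List.pairwise_cons.mp h with ⟨hx, hrest⟩
    by_cases hxt : x ≤ t
    · simp [popExpired, hxt, ih hrest, show ¬ t < x by omega]
    · simp only [popExpired, if_neg hxt]
      rw [List.filter_cons_of_pos (by simp; omega)]
      congr 1
      exact (List.filter_eq_self.mpr (fun e he => by simp; have := hx e he; omega)).symm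

theorem foldl_const_step (xs : List Int) (e : Int) (a : Int) (l : List Int) :
    xs.foldl (fun (s : Int × List Int) _ => (s.1 + 1, s.2 ++ [e])) (a, l)
      = (a + xs.length, l ++ List.replicate xs.length e) := by
  induction xs generalizing a l with
  | nil => simp
  | cons x rest ih =>
    simp only [List.foldl_cons, ih, List.length_cons]
    rw [Prod.mk.injEq]
    constructor
    · push_cast; ring
    · simp [List.replicate_succ, List.append_assoc]

theorem main_invariant (m k : Int) (rest : List Int) :
    ∀ (adds : List Int) (ans act : Int) (q : List Int),
      (∀ a ∈ adds, 0 ≤ a) →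
      q.Pairwise (· ≤ ·) →
      q.filter (fun e => decide ((adds.length : Int) < e)) = wl adds k (adds.length : Int) 0 →
      act = winSum adds k (adds.length : Int) 0 →
      ((PySem.List.enumerate rest (adds.length : Int)).foldl (stepA m k) (ans, q)).1
        = ((PySem.List.enumerate rest (adds.length : Int)).foldl (stepB m k) (ans, act, adds)).1 := by
  induction rest with
  | nil => intro adds ans act q _ _ _ _; simp [PySem.List.enumerate_nil]
  | cons p rest ih =>
    intro adds ans act q hnn hsort hq hact
    rw [PySem.List.enumerate_cons]
    simp only [List.foldl_cons]
    have hpop : popExpired q (adds.length : Int) = wl adds k (adds.length : Int) 0 := by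
      rw [popExpired_sorted q _ hsort]; exact hq
    have hlen : ((wl adds k (adds.length : Int) 0).length : Int) = act := by
      rw [wl_length adds k _ 0 hnn]; omega
    set h : Int := (adds.length : Int) with hh
    set need := PySem.Int.floordiv p m with hneed
    set add : Int := if need > act then need - act else 0 with hadd
    have hadd_nn : 0 ≤ add := by rw [hadd]; split <;> omega
    -- A's step produces (ans + add, wl ++ replicate add (h+k))
    have hA : stepA m k (ans, q) (h, p) = (ans + add, wl adds k h 0 ++ List.replicate add.toNat (h + k)) := by
      simp only [stepA, hpop, ← hneed]
      by_cases hc : need > act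
      · have haddc : add = need - act := by rw [hadd, if_pos hc]
        rw [if_pos (by omega)]
        rw [PySem.List.pyRange_one, foldl_const_step]
        simp only [List.length_map, List.length_range]
        rw [hlen, haddc, Prod.mk.injEq]
        constructor
        · omega
        · congr 2
          omega
      · have haddc : add = 0 := by rw [hadd, if_neg hc]
        rw [if_neg (by omega)]
        simp [haddc]
    -- B's step produces (ans + add, winSum adds' k (h+1) 0, adds')
    set adds' := adds ++ [add] with hadds'
    have hnn' : ∀ a ∈ adds', 0 ≤ a := by
      intro a ha; rw [hadds'] at ha; rcases List.mem_append.mp ha with h1 | h1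
      · exact hnn a h1
      · simp only [List.mem_singleton] at h1
        rw [h1]; exact hadd_nn
    have hlen' : (adds'.length : Int) = h + 1 := by rw [hadds']; simp [hh]
    have hw1 : winSum adds' k (h + 1) 0 =
        winSum adds k (h + 1) 0 + (if h + k > h + 1 then add else 0) := by
      rw [hadds', winSum_append]
      split_ifs <;> omega
    have hw2 : winSum adds k (h + 1) 0 =
        winSum adds k h 0 -
          (if 0 ≤ h + 1 - k ∧ h + 1 - k < h then PySem.List.pyGetD adds (h + 1 - k) 0 else 0) := by
      have hws := winSum_succ adds k h 0
      rw [hws]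
      congr 1
      by_cases hc : (0:Int) ≤ h + 1 - k ∧ h + 1 - k < h
      · rw [if_pos (by omega), if_pos hc]
        congr 1
        ring
      · rw [if_neg (by rw [← hh]; omega), if_neg hc]
    have hB : stepB m k (ans, act, adds) (h, p) = (ans + add, winSum adds' k (h + 1) 0, adds') := by
      simp only [stepB, ← hneed, ← hadd, ← hadds']
      by_cases hk : 2 ≤ k
      · rw [if_pos hk]
        by_cases hg : (0:Int) ≤ h - k + 1
        · rw [if_pos hg, Prod.mk.injEq, Prod.mk.injEq]
          refine ⟨rfl, ?_, rfl⟩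
          have hgetD : PySem.List.pyGetD adds' (h - k + 1) 0 = PySem.List.pyGetD adds (h + 1 - k) 0 := by
            obtain ⟨n, hn⟩ : ∃ n : Nat, h + 1 - k = (n : Int) := ⟨(h + 1 - k).toNat, by omega⟩
            have hnlt : n < adds.length := by omega
            rw [show h - k + 1 = (n : Int) from by omega, hn,
               PySem.List.pyGetD_natCast, PySem.List.pyGetD_natCast, hadds']
            rw [List.getD_append _ _ _ _ hnlt]
          rw [hgetD, hw1, hw2, if_pos (by omega), if_pos (by omega)]
          rw [hact]
          ring
        · rw [if_neg hg, Prod.mk.injEq, Prod.mk.injEq]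
          refine ⟨rfl, ?_, rfl⟩
          rw [hw1, hw2, if_neg (by omega), if_pos (by omega)]
          rw [hact]
          ring
      · rw [if_neg hk, Prod.mk.injEq, Prod.mk.injEq]
        refine ⟨rfl, ?_, rfl⟩
        rw [hw1, hw2, if_neg (by omega), if_neg (by omega)]
        rw [hact]
        ring
    -- the invariant at h + 1
    set q' := wl adds k h 0 ++ List.replicate add.toNat (h + k) with hq'
    have hsort' : q'.Pairwise (· ≤ ·) := by
      rw [hq']
      refine List.pairwise_append.mpr ⟨wl_pairwise adds k h 0, List.pairwise_replicate.mpr (by simp), ?_⟩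
      intro x hx y hy
      have hub := wl_mem_ub adds k h 0 x hx
      have := List.eq_of_mem_replicate hy
      omega
    have hq'' : q'.filter (fun e => decide ((adds'.length : Int) < e)) = wl adds' k (adds'.length : Int) 0 := by
      rw [hlen', hq', List.filter_append, wl_filter adds k h (h + 1) 0 (by omega)]
      rw [hadds', wl_append]
      congr 1
      by_cases hc : (0:Int) + (adds.length : Int) + k > h + 1
      · rw [if_pos hc, List.filter_replicate, if_pos (by simp; omega)]
        congr 1
        omega
      · rw [if_neg hc, List.filter_replicate, if_neg (by simp; omega)]
    have hstep := ih adds' (ans + add) (winSum adds' k (h + 1) 0) q' hnn' hsort' hq''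
      (by rw [hlen'])
    rw [hA, hB]
    rw [hlen'] at hstep
    exact hstep

-- ===== VERDICT (by name: the statement is the Claim_ definition above) =====
theorem solution_spec : Claim_equal_solution := by
  intro players m k _ _
  unfold Spec_solution solution solution_alt
  have := main_invariant m k players [] 0 0 [] (by simp) (by simp) (by simp [wl]) (by simp [winSum])
  simpa using this
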